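-- pv_equiv track=rewrite | github.com/sunshine0677/KMOR | dpkmor.py | reconstruct_route
-- ===== SOURCE A (Python) =====
-- from typing import Dict, List, Tuple, Iterable, Optional, Any, Set
--
-- def reconstruct_route(seq: List[int], paths_table: List[List[List[str]]], terms: List[str]) -> List[str]:
--     if not seq:
--         return []
--     route: List[str] = [terms[seq[0]]]
--     for a, b in zip(seq, seq[1:]):
--         seg = paths_table[a][b]
--         if not seg:
--             return []
--         route.extend(seg[1:])
--     return route
-- ===== SOURCE B (Python) =====
-- from typing import List
--
-- def reconstruct_route(seq: List[int], paths_table: List[List[List[str]]], terms: List[str]) -> List[str]: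
--     if not seq:
--         return []
--     head = terms[seq[0]]
--
--     def solve(pairs):
--         # divide and conquer: segment tails over `pairs`; None signals an empty segment
--         if not pairs:
--             return []
--         if len(pairs) == 1:
--             a, b = pairs[0]
--             seg = paths_table[a][b]
--             return None if not seg else seg[1:]
--         k = len(pairs) // 2
--         left = solve(pairs[:k])
--         if left is None:
--             return None
--         right = solve(pairs[k:])
--         return None if right is None else left + right
--
--     t = solve(list(zip(seq, seq[1:])))
--     return [] if t is None else [head] + t
-- ===== Notes on version B (the rewrite author's own statement) =====
-- stated objective: alternative
-- what changed: A's single left-to-right accumulator loop with early return is replaced by a divide-and-conquer over the consecutive-pair list whose Option-style result (None on an empty segment) short-circuits left before right, combined by concatenation under the start term.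
import Mathlib
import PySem

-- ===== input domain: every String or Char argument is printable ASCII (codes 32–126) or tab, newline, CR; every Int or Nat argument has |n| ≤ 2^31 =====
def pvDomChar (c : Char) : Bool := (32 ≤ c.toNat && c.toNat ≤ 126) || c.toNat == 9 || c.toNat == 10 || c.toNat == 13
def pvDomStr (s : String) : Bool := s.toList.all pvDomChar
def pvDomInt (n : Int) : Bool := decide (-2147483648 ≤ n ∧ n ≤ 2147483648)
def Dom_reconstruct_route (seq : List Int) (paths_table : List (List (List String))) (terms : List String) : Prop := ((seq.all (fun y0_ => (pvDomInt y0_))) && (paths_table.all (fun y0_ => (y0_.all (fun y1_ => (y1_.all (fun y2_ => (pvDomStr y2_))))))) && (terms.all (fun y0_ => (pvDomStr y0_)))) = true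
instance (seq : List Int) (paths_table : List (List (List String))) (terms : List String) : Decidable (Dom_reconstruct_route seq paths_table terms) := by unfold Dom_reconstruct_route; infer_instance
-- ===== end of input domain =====

-- B replaces A's left-to-right accumulator loop by a divide-and-conquer over the pair list
-- with an Option result (alternative decomposition, similar cost); equal on Pre_.

-- ===== PORT A =====
-- seg = paths_table[a][b]; lookups via pyGet? with a default (Pre_ guarantees some).
def rrSeg (pt : List (List (List String))) (a b : Int) : List String :=
  (PySem.List.pyGet? ((PySem.List.pyGet? pt a).getD []) b).getD []

-- the 'for a, b in zip(seq, seq[1:])' loop with its early return (result []) on an empty seg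
def rrGo (pt : List (List (List String))) : List (Int × Int) → List String → List String
  | [], route => route
  | (a, b) :: ps, route =>
      let seg := rrSeg pt a b
      if seg.isEmpty then [] else rrGo pt ps (route ++ seg.drop 1)

def reconstruct_route (seq : List Int) (paths_table : List (List (List String))) (terms : List String) : List String :=
  match seq with
  | [] => []
  | s0 :: _ => rrGo paths_table (seq.zip seq.tail) [(PySem.List.pyGet? terms s0).getD ""]

-- ===== PORT B =====
-- Source B's solve(pairs): divide and conquer, none = 'an empty segment was hit' (left checked first)
def rrSolve (pt : List (List (List String))) : List (Int × Int) → Option (List String)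
  | [] => some []
  | [p] =>
      if (rrSeg pt p.1 p.2).isEmpty then none else some ((rrSeg pt p.1 p.2).drop 1)
  | p :: q :: t =>
      -- k = len(pairs) // 2, inlined: Nat division of a length by the positive literal 2, which matches Python's //
      match rrSolve pt ((p :: q :: t).take ((p :: q :: t).length / 2)) with
      | none => none
      | some l =>
          match rrSolve pt ((p :: q :: t).drop ((p :: q :: t).length / 2)) with
          | none => none
          | some r => some (l ++ r)
  termination_by ps => ps.length
  decreasing_by
    · simp [List.length_take]; omega
    · simp [List.length_drop]; omega

def reconstruct_route_alt (seq : List Int) (paths_table : List (List (List String))) (terms : List String) : List String :=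
  match seq with
  | [] => []
  | s0 :: _ =>
      let head := (PySem.List.pyGet? terms s0).getD ""
      match rrSolve paths_table (seq.zip seq.tail) with
      | none => []
      | some t => head :: t

-- ===== PRECONDITION & SPEC =====
-- table lookup for a consecutive pair (a, b): paths_table[a][b], none if either index is out of range
def rrPair? (pt : List (List (List String))) (p : Int × Int) : Option (List String) :=
  match PySem.List.pyGet? pt p.1 with
  | none => none
  | some row => PySem.List.pyGet? row p.2

-- Pre_ excludes exactly the inputs where the Python A raises IndexError: terms[seq[0]] must be
-- in range, and each pair's table lookup must be in range whenever every earlier pair's segment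
-- exists and is nonempty (A stops at the first empty segment, so later pairs are unconstrained).
def Pre_reconstruct_route (seq : List Int) (paths_table : List (List (List String))) (terms : List String) : Prop :=
  seq ≠ [] →
    ((PySem.List.pyGet? terms (seq.headD 0)).isSome = true ∧
     ∀ i, i < (seq.zip seq.tail).length →
       (∀ j, j < i →
         ((rrPair? paths_table ((seq.zip seq.tail).getD j (0, 0))).getD []).isEmpty = false) →
       (rrPair? paths_table ((seq.zip seq.tail).getD i (0, 0))).isSome = true)
instance (seq : List Int) (paths_table : List (List (List String))) (terms : List String) : Decidable (Pre_reconstruct_route seq paths_table terms) := by unfold Pre_reconstruct_route; infer_instance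

def pvWitness_reconstruct_route : List Int × List (List (List String)) × List String :=
  ([0, 1], [[["a"], ["a", "b"]], [["c"], ["d"]]], ["t0", "t1"])

def Spec_reconstruct_route (seq : List Int) (paths_table : List (List (List String))) (terms : List String) (out : List String) : Prop := out = reconstruct_route_alt seq paths_table terms
instance (seq : List Int) (paths_table : List (List (List String))) (terms : List String) (out : List String) : Decidable (Spec_reconstruct_route seq paths_table terms out) := by unfold Spec_reconstruct_route; infer_instance

-- ===== CLAIM (what is proved, stated in full; the proofs are below) =====
def Claim_equal_reconstruct_route : Prop := ∀ (seq : List Int) (paths_table : List (List (List String))) (terms : List String), Dom_reconstruct_route seq paths_table terms → Pre_reconstruct_route seq paths_table terms → Spec_reconstruct_route seq paths_table terms (reconstruct_route seq paths_table terms)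

-- ===== LEMMAS AND PROOFS =====
-- the linear reference version of rrSolve, used to bridge the two ports
def rrTails (pt : List (List (List String))) : List (Int × Int) → Option (List String)
  | [] => some []
  | (a, b) :: t =>
      let seg := rrSeg pt a b
      if seg.isEmpty then none
      else
        match rrTails pt t with
        | none => none
        | some r => some (seg.drop 1 ++ r)

theorem rrTails_append (pt : List (List (List String))) (xs ys : List (Int × Int)) :
    rrTails pt (xs ++ ys) =
      match rrTails pt xs with
      | none => none
      | some l =>
          match rrTails pt ys with
          | none => none
          | some r => some (l ++ r) := by
  induction xs with
  | nil => simp [rrTails]; cases rrTails pt ys <;> rfl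
  | cons p t ih =>
      obtain ⟨a, b⟩ := p
      simp only [List.cons_append, rrTails, ih]
      by_cases h : (rrSeg pt a b).isEmpty
      · simp [h]
      · simp only [h]
        cases rrTails pt t <;> cases rrTails pt ys <;> simp

theorem rrSolve_eq (pt : List (List (List String))) (ps : List (Int × Int)) :
    rrSolve pt ps = rrTails pt ps := by
  fun_induction rrSolve pt ps with
  | case1 => rfl
  | case2 p h =>
      obtain ⟨a, b⟩ := p
      simp [rrTails] at h ⊢
      simp [h]
  | case3 p h =>
      obtain ⟨a, b⟩ := p
      simp at h
      simp [rrTails, h]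
  | case4 p q t htake ihtake =>
      have hs := rrTails_append pt ((p :: q :: t).take ((p :: q :: t).length / 2))
        ((p :: q :: t).drop ((p :: q :: t).length / 2))
      rw [List.take_append_drop] at hs
      rw [hs, ← ihtake, htake]
  | case5 p q t l htake hdrop ihtake ihdrop =>
      have hs := rrTails_append pt ((p :: q :: t).take ((p :: q :: t).length / 2))
        ((p :: q :: t).drop ((p :: q :: t).length / 2))
      rw [List.take_append_drop] at hs
      rw [hs, ← ihtake, htake, ← ihdrop, hdrop]
  | case6 p q t l htake r hdrop ihtake ihdrop =>
      have hs := rrTails_append pt ((p :: q :: t).take ((p :: q :: t).length / 2))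
        ((p :: q :: t).drop ((p :: q :: t).length / 2))
      rw [List.take_append_drop] at hs
      rw [hs, ← ihtake, htake, ← ihdrop, hdrop]
theorem rrGo_eq (pt : List (List (List String))) (ps : List (Int × Int)) (route : List String) :
    rrGo pt ps route =
      match rrTails pt ps with
      | none => []
      | some t => route ++ t := by
  induction ps generalizing route with
  | nil => simp [rrGo, rrTails]
  | cons p t ih =>
      obtain ⟨a, b⟩ := p
      simp only [rrGo, rrTails]
      by_cases h : (rrSeg pt a b).isEmpty
      · simp [h]
      · simp only [h, ih]
        cases rrTails pt t <;> simp

-- ===== VERDICT (by name: the statement is the Claim_ definition above) =====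
theorem reconstruct_route_spec : Claim_equal_reconstruct_route := by
  intro seq pt terms _ _
  unfold Spec_reconstruct_route
  cases seq with
  | nil => rfl
  | cons s0 rest =>
      simp only [reconstruct_route, reconstruct_route_alt, rrGo_eq, rrSolve_eq]
      cases rrTails pt ((s0 :: rest).zip (s0 :: rest).tail) <;> simp
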